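-- pv_equiv track=rewrite | github.com/autopkg/dataJAR-recipes | *AutoPkg Linters/MunkiInstallsItemsCreatorChecker/MunkiInstallsItemsCreatorChecker.py | _find_arguments_dict
-- ===== SOURCE A (Python) =====
-- TAG_DICT_OPEN = '<dict>'
--
-- TAG_DICT_CLOSE = '</dict>'
--
-- TAG_ARGUMENTS_KEY = '<key>Arguments</key>'
--
-- def _find_arguments_dict(creator_dict):
--     """Find and extract Arguments dict from creator dict.
--
--     Args:
--         creator_dict: MunkiInstallsItemsCreator dict content
--
--     Returns:
--         Tuple of (args_dict, args_content_start, args_end) or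
--         (None, None, None)
--     """
--     args_start = creator_dict.find(TAG_ARGUMENTS_KEY)
--     if args_start == -1:
--         return None, None, None
--
--     dict_after_args = creator_dict.find(TAG_DICT_OPEN, args_start)
--     if dict_after_args == -1:
--         return None, None, None
--
--     # Count depth to find matching </dict> for Arguments
--     depth = 1
--     search_pos = dict_after_args + 6
--     args_end = -1
--
--     while depth > 0 and search_pos < len(creator_dict):
--         if creator_dict[search_pos:search_pos+6] == TAG_DICT_OPEN:
--             depth += 1
--             search_pos += 6
--         elif creator_dict[search_pos:search_pos+7] == TAG_DICT_CLOSE: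
--             depth -= 1
--             if depth == 0:
--                 args_end = search_pos + 7
--                 break
--             search_pos += 7
--         else:
--             search_pos += 1
--
--     if args_end == -1:
--         return None, None, None
--
--     args_dict = creator_dict[args_start:args_end]
--     args_content_start = dict_after_args + 6
--
--     return args_dict, args_content_start, args_end
-- ===== SOURCE B (Python) =====
-- TAG_DICT_OPEN = '<dict>'
--
-- TAG_DICT_CLOSE = '</dict>'
--
-- TAG_ARGUMENTS_KEY = '<key>Arguments</key>'
--
--
-- def _dict_tokens(text, start):
--     """List every '<dict>'/'</dict>' token at or after start as (is_open, end_index)."""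
--     tokens = []
--     i = start
--     n = len(text)
--     while i < n:
--         if text[i] != '<':
--             i += 1
--         elif text[i:i+6] == TAG_DICT_OPEN:
--             tokens.append((True, i + 6))
--             i += 6
--         elif text[i:i+7] == TAG_DICT_CLOSE:
--             tokens.append((False, i + 7))
--             i += 7
--         else:
--             i += 1
--     return tokens
--
--
-- def _find_arguments_dict(creator_dict):
--     """Find and extract Arguments dict from creator dict (tokenize, then depth walk)."""
--     args_start = creator_dict.find(TAG_ARGUMENTS_KEY)
--     if args_start == -1:
--         return None, None, None
--
--     dict_after_args = creator_dict.find(TAG_DICT_OPEN, args_start)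
--     if dict_after_args == -1:
--         return None, None, None
--
--     args_content_start = dict_after_args + 6
--     depth = 1
--     for is_open, tok_end in _dict_tokens(creator_dict, args_content_start):
--         depth += 1 if is_open else -1
--         if depth == 0:
--             return (creator_dict[args_start:tok_end],
--                     args_content_start, tok_end)
--     return None, None, None
-- ===== Notes on version B (the rewrite author's own statement) =====
-- stated objective: alternative
-- what changed: A interleaves character stepping, tag matching and depth counting with a break-and-sentinel while loop; B separates concerns into two phases: a tokenizer that lists every <dict>/</dict> token after the Arguments dict open, then a depth walk over the token list that returns directly when depth reaches 0 (no args_end sentinel).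
import Mathlib
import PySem

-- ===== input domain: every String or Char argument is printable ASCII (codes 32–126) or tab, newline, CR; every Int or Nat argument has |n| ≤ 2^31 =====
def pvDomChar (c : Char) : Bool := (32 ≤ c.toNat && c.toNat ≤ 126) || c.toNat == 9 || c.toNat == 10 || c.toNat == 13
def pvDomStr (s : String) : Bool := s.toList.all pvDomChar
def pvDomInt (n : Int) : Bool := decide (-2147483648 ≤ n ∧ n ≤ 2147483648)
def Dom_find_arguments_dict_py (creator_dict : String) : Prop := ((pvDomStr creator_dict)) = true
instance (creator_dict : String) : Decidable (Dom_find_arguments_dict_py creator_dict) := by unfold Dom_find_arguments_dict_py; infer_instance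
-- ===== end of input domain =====

-- B replaces A's interleaved scan-with-depth-and-sentinel by a two-phase decomposition
-- (tokenize all <dict>/</dict> tags, then walk the token list by depth); same cost, equal output.

-- ===== PORT A =====
-- A's while loop: depth counting interleaved with the character scan; returns args_end (-1 = not found).
-- fuel only bounds the recursion (the loop advances pos by ≥1 while pos < len); it never changes the value computed.
def pvLoopA (s : List Char) : Nat → Int → Int → Int
  | 0, _, _ => -1
  | fuel + 1, depth, pos =>
      if 0 < depth ∧ pos < (s.length : Int) then
        if PySem.List.slice s (some pos) (some (pos + 6)) = "<dict>".toList then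
          pvLoopA s fuel (depth + 1) (pos + 6)
        else if PySem.List.slice s (some pos) (some (pos + 7)) = "</dict>".toList then
          if depth - 1 = 0 then pos + 7
          else pvLoopA s fuel (depth - 1) (pos + 7)
        else pvLoopA s fuel depth (pos + 1)
      else -1

def find_arguments_dict_py (creator_dict : String) : Option String × Option Int × Option Int :=
  let s := creator_dict.toList
  let args_start := PySem.Chars.find s "<key>Arguments</key>".toList
  if args_start = -1 then (none, none, none)
  else
    let dict_after_args := PySem.Chars.findFrom s "<dict>".toList args_start
    if dict_after_args = -1 then (none, none, none)
    else
      let args_end := pvLoopA s (s.length + 1) 1 (dict_after_args + 6)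
      if args_end = -1 then (none, none, none)
      else
        (some (String.ofList (PySem.List.slice s (some args_start) (some args_end))),
         some (dict_after_args + 6), some args_end)

-- ===== PORT B =====
-- B phase 1: list every '<dict>' / '</dict>' token at or after i as (is_open, end_index); fuel bounds recursion only.
def pvTokens (s : List Char) : Nat → Int → List (Bool × Int)
  | 0, _ => []
  | fuel + 1, i =>
      if i < (s.length : Int) then
        if PySem.List.pyGet? s i ≠ some '<' then pvTokens s fuel (i + 1)
        else if PySem.List.slice s (some i) (some (i + 6)) = "<dict>".toList then
          (true, i + 6) :: pvTokens s fuel (i + 6)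
        else if PySem.List.slice s (some i) (some (i + 7)) = "</dict>".toList then
          (false, i + 7) :: pvTokens s fuel (i + 7)
        else pvTokens s fuel (i + 1)
      else []

-- B phase 2: walk the token list maintaining depth; return as soon as depth reaches 0.
def pvWalk (s : List Char) (args_start args_content_start : Int) :
    Int → List (Bool × Int) → Option String × Option Int × Option Int
  | _, [] => (none, none, none)
  | depth, (isOpen, tokEnd) :: rest =>
      let depth' := depth + (if isOpen then 1 else -1)
      if depth' = 0 then
        (some (String.ofList (PySem.List.slice s (some args_start) (some tokEnd))),
         some args_content_start, some tokEnd)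
      else pvWalk s args_start args_content_start depth' rest

def find_arguments_dict_py_alt (creator_dict : String) : Option String × Option Int × Option Int :=
  let s := creator_dict.toList
  let args_start := PySem.Chars.find s "<key>Arguments</key>".toList
  if args_start = -1 then (none, none, none)
  else
    let dict_after_args := PySem.Chars.findFrom s "<dict>".toList args_start
    if dict_after_args = -1 then (none, none, none)
    else
      pvWalk s args_start (dict_after_args + 6) 1 (pvTokens s (s.length + 1) (dict_after_args + 6))

-- ===== PRECONDITION & SPEC =====
def Spec_find_arguments_dict_py (creator_dict : String) (out : Option String × Option Int × Option Int) : Prop := out = find_arguments_dict_py_alt creator_dict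
instance (creator_dict : String) (out : Option String × Option Int × Option Int) : Decidable (Spec_find_arguments_dict_py creator_dict out) := by unfold Spec_find_arguments_dict_py; infer_instance

-- ===== CLAIM (what is proved, stated in full; the proofs are below) =====
def Claim_equal_find_arguments_dict_py : Prop := ∀ (creator_dict : String), Dom_find_arguments_dict_py creator_dict → Spec_find_arguments_dict_py creator_dict (find_arguments_dict_py creator_dict)

-- ===== LEMMAS AND PROOFS =====

-- A slice equal to a nonempty literal pins down the character at its start.
theorem pvSliceHead (s : List Char) (pos : Int) (h0 : 0 ≤ pos) (c : Char) (ts : List Char)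
    (ht : PySem.List.slice s (some pos) (some (pos + (1 + (ts.length : Int)))) = c :: ts) :
    PySem.List.pyGet? s pos = some c := by
  rw [PySem.List.slice_toNat s h0 (by omega)] at ht
  have hk : (pos + (1 + (ts.length : Int))).toNat - pos.toNat = ts.length + 1 := by omega
  rw [hk] at ht
  cases hdrop : s.drop pos.toNat with
  | nil => rw [hdrop] at ht; simp at ht
  | cons x xs =>
      rw [hdrop, List.take_succ_cons] at ht
      obtain ⟨hx, -⟩ := List.cons.inj ht
      have hpos : pos = ((pos.toNat : Nat) : Int) := by omega
      rw [hpos, PySem.List.pyGet?_natCast, ← List.head?_drop, hdrop, hx]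
      rfl

-- The two phases of B, folded together, compute exactly A's loop result.
theorem pvKey (s : List Char) (a c : Int) :
    ∀ (m : Nat) (pos depth : Int), ((s.length : Int) - pos).toNat ≤ m → 0 ≤ pos → 0 < depth →
    pvWalk s a c depth (pvTokens s m pos) =
      (if pvLoopA s m depth pos = -1 then (none, none, none)
       else (some (String.ofList (PySem.List.slice s (some a) (some (pvLoopA s m depth pos)))),
             some c, some (pvLoopA s m depth pos))) := by
  intro m
  induction m with
  | zero =>
      intro pos depth hm h0 hd
      simp [pvTokens, pvLoopA, pvWalk]
  | succ m ih =>
      intro pos depth hm h0 hd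
      by_cases hn : pos < (s.length : Int)
      · rw [show pvTokens s (m + 1) pos =
            (if pos < (s.length : Int) then
              if PySem.List.pyGet? s pos ≠ some '<' then pvTokens s m (pos + 1)
              else if PySem.List.slice s (some pos) (some (pos + 6)) = "<dict>".toList then
                (true, pos + 6) :: pvTokens s m (pos + 6)
              else if PySem.List.slice s (some pos) (some (pos + 7)) = "</dict>".toList then
                (false, pos + 7) :: pvTokens s m (pos + 7)
              else pvTokens s m (pos + 1)
            else []) from rfl, if_pos hn]
        have he : pvLoopA s (m + 1) depth pos =
            (if PySem.List.slice s (some pos) (some (pos + 6)) = "<dict>".toList then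
              pvLoopA s m (depth + 1) (pos + 6)
            else if PySem.List.slice s (some pos) (some (pos + 7)) = "</dict>".toList then
              if depth - 1 = 0 then pos + 7 else pvLoopA s m (depth - 1) (pos + 7)
            else pvLoopA s m depth (pos + 1)) := by
          rw [show pvLoopA s (m + 1) depth pos =
              (if 0 < depth ∧ pos < (s.length : Int) then
                if PySem.List.slice s (some pos) (some (pos + 6)) = "<dict>".toList then
                  pvLoopA s m (depth + 1) (pos + 6)
                else if PySem.List.slice s (some pos) (some (pos + 7)) = "</dict>".toList then
                  if depth - 1 = 0 then pos + 7 else pvLoopA s m (depth - 1) (pos + 7)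
                else pvLoopA s m depth (pos + 1)
              else -1) from rfl, if_pos ⟨hd, hn⟩]
        by_cases hopen : PySem.List.slice s (some pos) (some (pos + 6)) = "<dict>".toList
        · have hget : PySem.List.pyGet? s pos = some '<' := by
            apply pvSliceHead s pos h0 '<' "dict>".toList
            have hl : ((("dict>".toList).length : Nat) : Int) = 5 := by decide
            have hc : ('<' :: "dict>".toList) = "<dict>".toList := by decide
            rw [hl, hc, show (1 : Int) + 5 = 6 from by norm_num]
            exact hopen
          rw [if_pos hopen] at he
          rw [if_neg (by simp [hget]), if_pos hopen]
          rw [pvWalk]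
          simp only [if_true]
          rw [if_neg (by omega : ¬ depth + 1 = 0), he]
          exact ih (pos + 6) (depth + 1) (by omega) (by omega) (by omega)
        · by_cases hclose : PySem.List.slice s (some pos) (some (pos + 7)) = "</dict>".toList
          · have hget : PySem.List.pyGet? s pos = some '<' := by
              apply pvSliceHead s pos h0 '<' "/dict>".toList
              have hl : ((("/dict>".toList).length : Nat) : Int) = 6 := by decide
              have hc : ('<' :: "/dict>".toList) = "</dict>".toList := by decide
              rw [hl, hc, show (1 : Int) + 6 = 7 from by norm_num]
              exact hclose
            rw [if_neg hopen, if_pos hclose] at he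
            rw [if_neg (by simp [hget]), if_neg hopen, if_pos hclose]
            rw [pvWalk]
            simp only [Bool.false_eq_true, if_false]
            have hm1 : depth + -1 = depth - 1 := by ring
            rw [hm1]
            by_cases hz : depth - 1 = 0
            · rw [if_pos hz] at he
              rw [if_pos hz, he, if_neg (show ¬ pos + 7 = -1 by omega)]
            · rw [if_neg hz] at he
              rw [if_neg hz, he]
              exact ih (pos + 7) (depth - 1) (by omega) (by omega) (by omega)
          · rw [if_neg hopen, if_neg hclose] at he
            rw [he]
            by_cases hget : PySem.List.pyGet? s pos = some '<'
            · rw [if_neg (by simp [hget]), if_neg hopen, if_neg hclose]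
              exact ih (pos + 1) depth (by omega) (by omega) hd
            · rw [if_pos (by simp [hget])]
              exact ih (pos + 1) depth (by omega) (by omega) hd
      · have ht : pvTokens s (m + 1) pos = [] := by
          rw [show pvTokens s (m + 1) pos =
              (if pos < (s.length : Int) then
                if PySem.List.pyGet? s pos ≠ some '<' then pvTokens s m (pos + 1)
                else if PySem.List.slice s (some pos) (some (pos + 6)) = "<dict>".toList then
                  (true, pos + 6) :: pvTokens s m (pos + 6)
                else if PySem.List.slice s (some pos) (some (pos + 7)) = "</dict>".toList then
                  (false, pos + 7) :: pvTokens s m (pos + 7)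
                else pvTokens s m (pos + 1)
              else []) from rfl, if_neg hn]
        have he : pvLoopA s (m + 1) depth pos = -1 := by
          rw [show pvLoopA s (m + 1) depth pos =
              (if 0 < depth ∧ pos < (s.length : Int) then
                if PySem.List.slice s (some pos) (some (pos + 6)) = "<dict>".toList then
                  pvLoopA s m (depth + 1) (pos + 6)
                else if PySem.List.slice s (some pos) (some (pos + 7)) = "</dict>".toList then
                  if depth - 1 = 0 then pos + 7 else pvLoopA s m (depth - 1) (pos + 7)
                else pvLoopA s m depth (pos + 1)
              else -1) from rfl, if_neg (by omega)]
        rw [ht, he]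
        simp [pvWalk]

-- findFrom's result, when not -1, is nonnegative (start index here is a nonnegative find result).
theorem pvFindFromNonneg (s sub : List Char) (a : Int) (ha0 : 0 ≤ a) (hal : a ≤ (s.length : Int))
    (h : PySem.Chars.findFrom s sub a ≠ -1) : 0 ≤ PySem.Chars.findFrom s sub a := by
  have hk : a = ((a.toNat : Nat) : Int) := by omega
  rw [hk] at h ⊢
  have := PySem.Chars.findFrom_natCast_spec s sub a.toNat (by omega) h
  omega

-- ===== VERDICT (by name: the statement is the Claim_ definition above) =====
theorem find_arguments_dict_py_spec : Claim_equal_find_arguments_dict_py := by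
  intro cd _hdom
  unfold Spec_find_arguments_dict_py find_arguments_dict_py find_arguments_dict_py_alt
  simp only []
  by_cases h1 : PySem.Chars.find cd.toList "<key>Arguments</key>".toList = -1
  · rw [if_pos h1, if_pos h1]
  · rw [if_neg h1, if_neg h1]
    by_cases h2 : PySem.Chars.findFrom cd.toList "<dict>".toList
        (PySem.Chars.find cd.toList "<key>Arguments</key>".toList) = -1
    · rw [if_pos h2, if_pos h2]
    · rw [if_neg h2, if_neg h2]
      have ha0 : 0 ≤ PySem.Chars.find cd.toList "<key>Arguments</key>".toList := by
        rw [PySem.Chars.find_nonneg_iff]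
        exact (PySem.Chars.find_ne_neg_one_iff _ _).mp h1
      have hal := PySem.Chars.find_le_length cd.toList "<key>Arguments</key>".toList
      have hd0 := pvFindFromNonneg cd.toList "<dict>".toList _ ha0 hal h2
      rw [pvKey cd.toList _ _ (cd.toList.length + 1) _ 1 (by omega) (by omega) (by omega)]
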